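-- pv_equiv track=rewrite | github.com/nainajnahO/rag-knowledge-base | app/chunking.py | _pack_with_overlap
-- ===== SOURCE A (Python) =====
-- MAX_TOKENS = 600
--
-- OVERLAP_TOKENS = 90
--
-- def _pack_with_overlap(pieces: list[str], piece_counts: list[int]) -> list[str]:
--     windows: list[str] = []
--     cur_pieces: list[str] = []
--     cur_counts: list[int] = []
--
--     for piece, count in zip(pieces, piece_counts):
--         if cur_pieces and sum(cur_counts) + count > MAX_TOKENS:
--             windows.append("".join(cur_pieces))
--
--             tail_pieces: list[str] = []
--             tail_counts: list[int] = []
--             running = 0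
--             for p, c in zip(reversed(cur_pieces), reversed(cur_counts)):
--                 if running + c > OVERLAP_TOKENS:
--                     break
--                 tail_pieces.insert(0, p)
--                 tail_counts.insert(0, c)
--                 running += c
--             cur_pieces = tail_pieces
--             cur_counts = tail_counts
--
--         cur_pieces.append(piece)
--         cur_counts.append(count)
--
--     if cur_pieces:
--         windows.append("".join(cur_pieces))
--
--     return windows
-- ===== SOURCE B (Python) =====
-- MAX_TOKENS = 600
--
-- OVERLAP_TOKENS = 90
--
-- def _pack_with_overlap(pieces: list[str], piece_counts: list[int]) -> list[str]:
--     # Every window A produces is a contiguous slice of `pieces` (the overlap tail is a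
--     # suffix of the previous window, itself contiguous).  So instead of maintaining the
--     # current window as mutable lists, work purely with indices over one prefix-sum
--     # array and emit each window as a single slice join.
--     n = min(len(pieces), len(piece_counts))
--     prefix = [0]
--     total = 0
--     for c in piece_counts[:n]:
--         total += c
--         prefix.append(total)
--
--     windows: list[str] = []
--     lo = 0  # current window is pieces[lo:i]
--     for i in range(n):
--         if lo < i and prefix[i] - prefix[lo] + piece_counts[i] > MAX_TOKENS:
--             windows.append("".join(pieces[lo:i]))
--             t = i  # new window start: maximal suffix scan, first violation stops it
--             while t > lo and prefix[i] - prefix[t - 1] <= OVERLAP_TOKENS: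
--                 t -= 1
--             lo = t
--     if lo < n:
--         windows.append("".join(pieces[lo:n]))
--     return windows
-- ===== Notes on version B (the rewrite author's own statement) =====
-- stated objective: faster
-- what changed: B exploits that every emitted window is a contiguous slice of the input: it precomputes one prefix-sum array and works purely with window-boundary indices (lo, i, overlap start t), emitting each window as a single slice join, instead of A's mutable cur_pieces/cur_counts lists with per-piece sum() recomputation and insert(0)-built tails.
import Mathlib
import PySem

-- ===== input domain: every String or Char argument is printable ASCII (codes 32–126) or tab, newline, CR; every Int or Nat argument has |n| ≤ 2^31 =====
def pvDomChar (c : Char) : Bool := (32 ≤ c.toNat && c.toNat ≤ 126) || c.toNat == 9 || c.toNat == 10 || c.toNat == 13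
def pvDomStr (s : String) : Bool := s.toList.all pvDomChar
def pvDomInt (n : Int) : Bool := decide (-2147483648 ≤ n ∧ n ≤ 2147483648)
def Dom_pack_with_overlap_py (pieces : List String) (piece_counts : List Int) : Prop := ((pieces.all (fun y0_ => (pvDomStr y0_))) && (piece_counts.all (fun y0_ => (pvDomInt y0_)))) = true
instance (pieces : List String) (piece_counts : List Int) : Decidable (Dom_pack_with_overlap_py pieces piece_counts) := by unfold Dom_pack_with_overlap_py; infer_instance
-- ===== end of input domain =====

-- B replaces A's mutable current-window lists (sum() recomputed per piece, insert(0)-built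
-- overlap tails) by prefix sums and pure window-boundary index arithmetic; objective: faster.

-- ===== PORT A =====
-- inner tail loop of A: prepend (list.insert(0, …)) while running + c ≤ OVERLAP_TOKENS, break otherwise
def pvTailA : List (String × Int) → List String → List Int → Int → List String × List Int
  | [], tp, tc, _ => (tp, tc)
  | (p, c) :: rest, tp, tc, running =>
      if running + c > 90 then (tp, tc)
      else pvTailA rest (p :: tp) (c :: tc) (running + c)

-- main loop of A over zip(pieces, piece_counts); sum(cur_counts) recomputed at every step
def pvLoopA : List (String × Int) → List String → List Int → List String → List String
  | [], curP, _, ws => if curP ≠ [] then ws ++ [PySem.Str.join "" curP] else ws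
  | (piece, count) :: rest, curP, curC, ws =>
      if curP ≠ [] ∧ curC.sum + count > 600 then
        let ws' := ws ++ [PySem.Str.join "" curP]
        let t := pvTailA (curP.reverse.zip curC.reverse) [] [] 0
        pvLoopA rest (t.1 ++ [piece]) (t.2 ++ [count]) ws'
      else
        pvLoopA rest (curP ++ [piece]) (curC ++ [count]) ws

def pack_with_overlap_py (pieces : List String) (piece_counts : List Int) : List String :=
  pvLoopA (pieces.zip piece_counts) [] [] []

-- ===== PORT B =====
-- prefix-sum build loop of Source B: total += c; prefix.append(total)
def pvPrefixLoop : List Int → Int → List Int → List Int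
  | acc, _, [] => acc
  | acc, total, c :: cs => pvPrefixLoop (acc ++ [total + c]) (total + c) cs

-- Source B's inner while: t -= 1 while t > lo and prefix[i] - prefix[t-1] <= OVERLAP_TOKENS
-- (all prefix indices are in range on every reachable call, so getD is exact)
def pvWhileB (pre : List Int) (i lo t : Nat) : Nat :=
  if h : lo < t ∧ pre.getD i 0 - pre.getD (t - 1) 0 ≤ 90 then
    pvWhileB pre i lo (t - 1)
  else t
termination_by t
decreasing_by omega

-- Source B's main for i in range(n) loop; state (lo, windows); pieces[lo:i] is exact as
-- drop/take since 0 ≤ lo ≤ i ≤ len(pieces) on every reachable call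
def pvLoopB (pieces : List String) (counts : List Int) (pre : List Int) :
    List Nat → Nat → List String → Nat × List String
  | [], lo, ws => (lo, ws)
  | i :: rest, lo, ws =>
      if lo < i ∧ pre.getD i 0 - pre.getD lo 0 + counts.getD i 0 > 600 then
        pvLoopB pieces counts pre rest (pvWhileB pre i lo i)
          (ws ++ [PySem.Str.join "" ((pieces.drop lo).take (i - lo))])
      else
        pvLoopB pieces counts pre rest lo ws

def pack_with_overlap_py_alt (pieces : List String) (piece_counts : List Int) : List String :=
  let n := min pieces.length piece_counts.length
  let pre := pvPrefixLoop [0] 0 (piece_counts.take n)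
  let r := pvLoopB pieces piece_counts pre (List.range n) 0 []
  if r.1 < n then r.2 ++ [PySem.Str.join "" ((pieces.drop r.1).take (n - r.1))] else r.2

-- ===== PRECONDITION & SPEC =====
def Spec_pack_with_overlap_py (pieces : List String) (piece_counts : List Int) (out : List String) : Prop := out = pack_with_overlap_py_alt pieces piece_counts
instance (pieces : List String) (piece_counts : List Int) (out : List String) : Decidable (Spec_pack_with_overlap_py pieces piece_counts out) := by unfold Spec_pack_with_overlap_py; infer_instance

-- ===== CLAIM (what is proved, stated in full; the proofs are below) =====
def Claim_equal_pack_with_overlap_py : Prop := ∀ (pieces : List String) (piece_counts : List Int), Dom_pack_with_overlap_py pieces piece_counts → Spec_pack_with_overlap_py pieces piece_counts (pack_with_overlap_py pieces piece_counts)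

-- ===== LEMMAS AND PROOFS =====

-- slice l[a:b] for 0 ≤ a ≤ b ≤ len l
def pvSl {α : Type} (l : List α) (a b : Nat) : List α := (l.drop a).take (b - a)

-- scan form of the prefix loop (proof-only helper)
def pvScan : Int → List Int → List Int
  | _, [] => []
  | t, c :: cs => (t + c) :: pvScan (t + c) cs

theorem pvPrefixLoop_eq : ∀ (cs acc : List Int) (t : Int),
    pvPrefixLoop acc t cs = acc ++ pvScan t cs := by
  intro cs
  induction cs with
  | nil => intro acc t; simp [pvPrefixLoop, pvScan]
  | cons c cs ih => intro acc t; simp [pvPrefixLoop, pvScan, ih]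

theorem pvScan_getD : ∀ (cs : List Int) (t : Int) (j : Nat), j < cs.length →
    (pvScan t cs).getD j 0 = t + (cs.take (j + 1)).sum := by
  intro cs
  induction cs with
  | nil => intro t j h; simp at h
  | cons c cs ih =>
      intro t j h
      cases j with
      | zero => simp [pvScan]
      | succ m =>
          have := ih (t + c) m (by simpa using h)
          simp only [pvScan, List.getD_cons_succ, List.take_succ_cons, List.sum_cons]
          rw [this]; ring

theorem pvPre_getD (cs : List Int) (j : Nat) (h : j ≤ cs.length) :
    (pvPrefixLoop [0] 0 cs).getD j 0 = (cs.take j).sum := by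
  rw [pvPrefixLoop_eq]
  cases j with
  | zero => simp
  | succ m =>
      have hm : m < cs.length := by omega
      have := pvScan_getD cs 0 m hm
      simpa using this

-- basic slice facts
theorem pvSl_self {α : Type} (l : List α) (a : Nat) : pvSl l a a = [] := by
  simp [pvSl]

theorem pvSl_len {α : Type} (l : List α) (a b : Nat) (hab : a ≤ b) (hb : b ≤ l.length) :
    (pvSl l a b).length = b - a := by
  simp [pvSl]; omega

theorem pvSl_ne_nil {α : Type} (l : List α) (a b : Nat) (hab : a ≤ b) (hb : b ≤ l.length) :
    pvSl l a b ≠ [] ↔ a < b := by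
  rw [← List.length_pos_iff, pvSl_len l a b hab hb]; omega

theorem pvSl_append {α : Type} (l : List α) (a b : Nat) (hab : a ≤ b) (hb : b < l.length) :
    pvSl l a b ++ [l[b]] = pvSl l a (b + 1) := by
  unfold pvSl
  have h1 : b + 1 - a = (b - a) + 1 := by omega
  rw [h1, List.take_succ]
  congr 1
  have : (l.drop a)[b - a]? = l[b]? := by
    rw [List.getElem?_drop]; congr 1; omega
  rw [this]
  simp [List.getElem?_eq_getElem hb]

theorem pvSl_cons {α : Type} (l : List α) (a b : Nat) (hab : a < b) (hb : b ≤ l.length) :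
    pvSl l (a) b = l[a]'(by omega) :: pvSl l (a + 1) b := by
  unfold pvSl
  rw [List.drop_eq_getElem_cons (by omega)]
  have h1 : b - a = (b - (a + 1)) + 1 := by omega
  rw [h1, List.take_succ_cons]

theorem pvSl_take {α : Type} (l : List α) (m a b : Nat) (hb : b ≤ m) :
    pvSl (l.take m) a b = pvSl l a b := by
  unfold pvSl
  rw [List.drop_take]
  rw [List.take_take]
  congr 1
  omega

theorem pvSl_sum (cs : List Int) (a b : Nat) (hab : a ≤ b) (hb : b ≤ cs.length) :
    (pvSl cs a b).sum = (cs.take b).sum - (cs.take a).sum := by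
  have : cs.take b = cs.take a ++ pvSl cs a b := by
    unfold pvSl
    have h1 : b = a + (b - a) := by omega
    rw [h1, List.take_add]
    have h2 : a + (b - a) - a = b - a := by omega
    rw [h2]
  rw [this, List.sum_append]
  ring

theorem pvSl_map {α β : Type} (f : α → β) (l : List α) (a b : Nat) :
    pvSl (l.map f) a b = (pvSl l a b).map f := by
  simp [pvSl]

theorem take_sum_succ (cs : List Int) (j : Nat) (h : j < cs.length) :
    (cs.take (j + 1)).sum = (cs.take j).sum + cs[j] :=
  List.sum_take_succ cs j h

-- zip of the reversed fst/snd projections of a pair list is its reverse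
theorem zip_proj_reverse (l : List (String × Int)) :
    (l.map Prod.fst).reverse.zip (l.map Prod.snd).reverse = l.reverse := by
  rw [← List.map_reverse, ← List.map_reverse, List.zip_map']
  simp

theorem pvWhileB_bounds (pre : List Int) (i lo : Nat) : ∀ t, lo ≤ t →
    lo ≤ pvWhileB pre i lo t ∧ pvWhileB pre i lo t ≤ t := by
  intro t
  induction t using Nat.strong_induction_on with
  | _ t ih =>
      intro hlo
      rw [pvWhileB]
      split
      · next h =>
          have := ih (t - 1) (by omega) (by omega)
          omega
      · omega

-- the tail scans agree: A's backwards prepend scan over the reversed current slice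
-- computes exactly the suffix pvSl · (pvWhileB …) k found by B's index while-loop
theorem tail_eq (zs : List (String × Int)) (pre : List Int) (k lo : Nat)
    (hk : k ≤ zs.length)
    (hpre : ∀ j, j ≤ zs.length → pre.getD j 0 = ((zs.map Prod.snd).take j).sum) :
    ∀ d t, t - lo = d → lo ≤ t → t ≤ k →
    pvTailA (pvSl zs lo t).reverse (pvSl (zs.map Prod.fst) t k) (pvSl (zs.map Prod.snd) t k)
        (((zs.map Prod.snd).take k).sum - ((zs.map Prod.snd).take t).sum)
      = (pvSl (zs.map Prod.fst) (pvWhileB pre k lo t) k,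
         pvSl (zs.map Prod.snd) (pvWhileB pre k lo t) k) := by
  intro d
  induction d with
  | zero =>
      intro t hd hlo ht
      have hlt : lo = t := by omega
      subst hlt
      rw [pvWhileB]
      rw [dif_neg (fun h => absurd h.1 (lt_irrefl _))]
      simp [pvSl_self, pvTailA]
  | succ d ih =>
      intro t hd hlo ht
      have hlt : lo < t := by omega
      have htlen : t ≤ zs.length := by omega
      have hsplit : pvSl zs lo t = pvSl zs lo (t - 1) ++ [zs[t - 1]'(by omega)] := by
        have h0 := pvSl_append zs lo (t - 1) (by omega) (by omega)
        have h1 : t - 1 + 1 = t := by omega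
        rw [h1] at h0
        exact h0.symm
      rw [hsplit, List.reverse_append, List.reverse_singleton]
      have hsum : ((zs.map Prod.snd).take t).sum
          = ((zs.map Prod.snd).take (t - 1)).sum + (zs.map Prod.snd)[t - 1]'(by simpa using (by omega : t - 1 < zs.length)) := by
        have h2 := take_sum_succ (zs.map Prod.snd) (t - 1) (by simpa using (by omega : t - 1 < zs.length))
        have h1 : t - 1 + 1 = t := by omega
        rw [h1] at h2
        exact h2
      have hgetsnd : (zs.map Prod.snd)[t - 1]'(by simpa using (by omega : t - 1 < zs.length)) = (zs[t - 1]'(by omega)).2 := by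
        simp
      simp only [List.singleton_append, pvTailA, List.get_eq_getElem]
      rw [pvWhileB]
      have hcond : (((zs.map Prod.snd).take k).sum - ((zs.map Prod.snd).take t).sum + (zs[t - 1]'(by omega)).2 > 90)
          ↔ ¬ (lo < t ∧ pre.getD k 0 - pre.getD (t - 1) 0 ≤ 90) := by
        rw [hpre k hk, hpre (t - 1) (by omega), hsum, hgetsnd]
        constructor
        · intro h; intro hc; omega
        · intro h
          by_contra hc
          exact h ⟨hlt, by omega⟩
      by_cases hb : ((zs.map Prod.snd).take k).sum - ((zs.map Prod.snd).take t).sum + (zs[t - 1]'(by omega)).2 > 90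
      · rw [if_pos hb, dif_neg (hcond.mp hb)]
      · rw [if_neg hb]
        rw [dif_pos (by by_contra hc; exact hb (hcond.mpr hc))]
        have hPcons : (zs[t - 1]'(by omega)).1 :: pvSl (zs.map Prod.fst) t k = pvSl (zs.map Prod.fst) (t - 1) k := by
          have := pvSl_cons (zs.map Prod.fst) (t - 1) k (by omega) (by simpa using (by omega : k ≤ zs.length))
          rw [this]
          congr 2
          · simp
          · omega
        have hCcons : (zs[t - 1]'(by omega)).2 :: pvSl (zs.map Prod.snd) t k = pvSl (zs.map Prod.snd) (t - 1) k := by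
          have := pvSl_cons (zs.map Prod.snd) (t - 1) k (by omega) (by simpa using (by omega : k ≤ zs.length))
          rw [this]
          congr 2
          · simp
          · omega
        rw [hPcons, hCcons]
        have hrun : ((zs.map Prod.snd).take k).sum - ((zs.map Prod.snd).take t).sum + (zs[t - 1]'(by omega)).2
            = ((zs.map Prod.snd).take k).sum - ((zs.map Prod.snd).take (t - 1)).sum := by
          rw [hsum, hgetsnd]; ring
        rw [hrun]
        exact ih (t - 1) (by omega) (by omega) (by omega)

-- the main loops agree, given the invariant curP/curC = the slices [lo:k)
theorem loop_eq (pieces : List String) (counts : List Int) (pre : List Int)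
    (zs : List (String × Int)) (hzs : zs = (pieces.take (min pieces.length counts.length)).zip (counts.take (min pieces.length counts.length)))
    (hpre : ∀ j, j ≤ zs.length → pre.getD j 0 = ((zs.map Prod.snd).take j).sum) :
    ∀ d k lo ws, zs.length - k = d → lo ≤ k → k ≤ zs.length →
    pvLoopA (zs.drop k) (pvSl (zs.map Prod.fst) lo k) (pvSl (zs.map Prod.snd) lo k) ws
      = (let r := pvLoopB pieces counts pre (List.range' k (zs.length - k)) lo ws;
         if r.1 < zs.length then r.2 ++ [PySem.Str.join "" ((pieces.drop r.1).take (zs.length - r.1))] else r.2) := by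
  have hn : zs.length = min pieces.length counts.length := by
    subst hzs; simp
  have hPn : zs.map Prod.fst = pieces.take zs.length := by
    subst hzs
    rw [List.map_fst_zip]
    · simp
    · simp
  have hCn : zs.map Prod.snd = counts.take zs.length := by
    subst hzs
    rw [List.map_snd_zip]
    · simp
    · simp
  intro d
  induction d with
  | zero =>
      intro k lo ws hd hlo hk
      have hkn : k = zs.length := by omega
      subst hkn
      simp only [List.drop_length, Nat.sub_self, List.range', pvLoopA, pvLoopB]
      have hjoin : PySem.Str.join "" (pvSl (zs.map Prod.fst) lo zs.length)
          = PySem.Str.join "" ((pieces.drop lo).take (zs.length - lo)) := by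
        rw [hPn, pvSl_take pieces zs.length lo zs.length (le_refl _)]
        rfl
      have hiff : pvSl (zs.map Prod.fst) lo zs.length ≠ [] ↔ lo < zs.length :=
        pvSl_ne_nil (zs.map Prod.fst) lo zs.length hlo (by simp)
      by_cases hlt : lo < zs.length
      · rw [if_pos (hiff.mpr hlt), if_pos hlt, hjoin]
      · rw [if_neg (fun hne => hlt (hiff.mp hne)), if_neg hlt]
  | succ d ih =>
      intro k lo ws hd hlo hk
      have hklt : k < zs.length := by omega
      have hdrop : zs.drop k = zs[k] :: zs.drop (k + 1) := List.drop_eq_getElem_cons hklt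
      have hrange : List.range' k (zs.length - k) = k :: List.range' (k + 1) (zs.length - (k + 1)) := by
        have h1 : zs.length - k = (zs.length - (k + 1)) + 1 := by omega
        rw [h1, List.range'_succ]
      rw [hdrop, hrange]
      have hklen : k < pieces.length := by omega
      have hkclen : k < counts.length := by omega
      -- components of zs[k]
      have hfst : (zs[k]).1 = (zs.map Prod.fst)[k]'(by simpa using hklt) := by simp
      have hsnd : (zs[k]).2 = (zs.map Prod.snd)[k]'(by simpa using hklt) := by simp
      -- condition equivalence
      have hsumeq : (pvSl (zs.map Prod.snd) lo k).sum
          = ((zs.map Prod.snd).take k).sum - ((zs.map Prod.snd).take lo).sum :=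
        pvSl_sum (zs.map Prod.snd) lo k hlo (by simpa using le_of_lt hklt)
      have hcget : counts.getD k 0 = (zs[k]).2 := by
        have h3 : (zs[k]).2 = counts[k]'hkclen := by
          have hk2 : k < (zs.map Prod.snd).length := by simpa using hklt
          calc (zs[k]).2 = (zs.map Prod.snd)[k]'hk2 := by simp
          _ = counts[k]'hkclen := by
              simp only [hCn]
              simp [List.getElem_take]
        rw [h3]
        simp [List.getD_eq_getElem?_getD, List.getElem?_eq_getElem hkclen]
      have hcondAB : (pvSl (zs.map Prod.fst) lo k ≠ [] ∧ (pvSl (zs.map Prod.snd) lo k).sum + (zs[k]).2 > 600)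
          ↔ (lo < k ∧ pre.getD k 0 - pre.getD lo 0 + counts.getD k 0 > 600) := by
        rw [pvSl_ne_nil (zs.map Prod.fst) lo k hlo (by simpa using le_of_lt hklt)]
        rw [hsumeq, hcget, hpre k (by omega), hpre lo (by omega)]
      simp only [pvLoopA, pvLoopB, List.get_eq_getElem]
      by_cases hc : pvSl (zs.map Prod.fst) lo k ≠ [] ∧ (pvSl (zs.map Prod.snd) lo k).sum + (zs[k]).2 > 600
      · rw [if_pos hc, if_pos (hcondAB.mp hc)]
        -- the emitted window strings agree
        have hjoin : PySem.Str.join "" (pvSl (zs.map Prod.fst) lo k) = PySem.Str.join "" ((pieces.drop lo).take (k - lo)) := by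
          rw [hPn, pvSl_take pieces zs.length lo k (le_of_lt hklt)]
          rfl
        -- the tail computations agree
        have hzip : (pvSl (zs.map Prod.fst) lo k).reverse.zip (pvSl (zs.map Prod.snd) lo k).reverse = (pvSl zs lo k).reverse := by
          rw [pvSl_map, pvSl_map]
          exact zip_proj_reverse (pvSl zs lo k)
        have htail := tail_eq zs pre k lo (le_of_lt hklt) hpre (k - lo) k rfl hlo (le_refl k)
        rw [pvSl_self, pvSl_self, sub_self] at htail
        set t' := pvWhileB pre k lo k with ht'
        have hb := pvWhileB_bounds pre k lo k hlo
        rw [hzip, htail]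
        have hP1 : pvSl (zs.map Prod.fst) t' k ++ [(zs[k]).1] = pvSl (zs.map Prod.fst) t' (k + 1) := by
          rw [hfst]
          exact pvSl_append (zs.map Prod.fst) t' k (by omega) (by simpa using hklt)
        have hC1 : pvSl (zs.map Prod.snd) t' k ++ [(zs[k]).2] = pvSl (zs.map Prod.snd) t' (k + 1) := by
          rw [hsnd]
          exact pvSl_append (zs.map Prod.snd) t' k (by omega) (by simpa using hklt)
        rw [hP1, hC1, hjoin]
        exact ih (k + 1) t' (ws ++ [PySem.Str.join "" ((pieces.drop lo).take (k - lo))]) (by omega) (by omega) (by omega)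
      · rw [if_neg hc, if_neg (fun h => hc (hcondAB.mpr h))]
        have hP1 : pvSl (zs.map Prod.fst) lo k ++ [(zs[k]).1] = pvSl (zs.map Prod.fst) lo (k + 1) := by
          rw [hfst]
          exact pvSl_append (zs.map Prod.fst) lo k hlo (by simpa using hklt)
        have hC1 : pvSl (zs.map Prod.snd) lo k ++ [(zs[k]).2] = pvSl (zs.map Prod.snd) lo (k + 1) := by
          rw [hsnd]
          exact pvSl_append (zs.map Prod.snd) lo k hlo (by simpa using hklt)
        rw [hP1, hC1]
        exact ih (k + 1) lo ws (by omega) (by omega) (by omega)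

theorem pvZipTake {α β : Type} : ∀ (a : List α) (b : List β),
    (a.take (min a.length b.length)).zip (b.take (min a.length b.length)) = a.zip b := by
  intro a
  induction a with
  | nil => intro b; simp
  | cons x a ih =>
      intro b
      cases b with
      | nil => simp
      | cons y b =>
          simp only [List.length_cons]
          have h : min (a.length + 1) (b.length + 1) = min a.length b.length + 1 := by omega
          rw [h, List.take_succ_cons, List.take_succ_cons, List.zip_cons_cons, List.zip_cons_cons, ih]

-- ===== VERDICT (by name: the statement is the Claim_ definition above) =====
theorem pack_with_overlap_py_spec : Claim_equal_pack_with_overlap_py := by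
  intro pieces counts _
  unfold Spec_pack_with_overlap_py pack_with_overlap_py pack_with_overlap_py_alt
  set n := min pieces.length counts.length with hn
  set zs := (pieces.take n).zip (counts.take n) with hzs
  have hzip : pieces.zip counts = zs := by
    rw [hzs, hn]
    exact (pvZipTake pieces counts).symm
  have hlen : zs.length = n := by simp [hzs, hn]
  have hCn : zs.map Prod.snd = counts.take n := by
    rw [hzs, List.map_snd_zip]
    simp
    omega
  have hpre : ∀ j, j ≤ zs.length → (pvPrefixLoop [0] 0 (counts.take n)).getD j 0 = ((zs.map Prod.snd).take j).sum := by
    intro j hj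
    rw [hCn]
    refine pvPre_getD (counts.take n) j ?_
    simp
    omega
  have key := loop_eq pieces counts (pvPrefixLoop [0] 0 (counts.take n)) zs (by rw [hzs, hn]) hpre zs.length 0 0 [] (by omega) (by omega) (by omega)
  simp only [List.drop_zero, pvSl_self, Nat.sub_zero] at key
  rw [hzip, key, hlen, ← List.range_eq_range']
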